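-- pv_equiv track=rewrite | github.com/deepak2090/InterviewKickStart | DynamicProgramming/pascalstraingle.py | Twodarray
-- ===== SOURCE A (Python) =====
-- def Twodarray(n):
--     #remember this is very critical
--     table = [[0] * n for i in range(n)]
--     for i in range(n):
--         table[0][i] = 1
--         table[i][0] = 1
--
--     for row in range(1,n):
--         for col in range(1,n):
--             table[row][col] = table[row-1][col-1] + table[row-1][col]
--     return table
-- ===== SOURCE B (Python) =====
-- def Twodarray(n):
--     # Each row r is the running prefix sum of binomial coefficients C(r, c),
--     # generated in O(1) each by the multiplicative recurrence; no 2D pulls.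
--     out = []
--     for r in range(n):
--         row = []
--         b = 1  # C(r, 0)
--         s = 0
--         for c in range(n):
--             s += b
--             row.append(s)
--             b = b * (r - c) // (c + 1)  # C(r, c+1); 0 once c >= r
--         out.append(row)
--     return out
-- ===== Notes on version B (the rewrite author's own statement) =====
-- stated objective: alternative
-- what changed: Replaces the 2D additive DP table (each cell pulled from the row above) by an independent per-row generator: each row r is emitted as the running prefix sum of the binomial coefficients C(r,c) produced by the multiplicative recurrence b = b*(r-c)//(c+1), with no table lookups.
import Mathlib
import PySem

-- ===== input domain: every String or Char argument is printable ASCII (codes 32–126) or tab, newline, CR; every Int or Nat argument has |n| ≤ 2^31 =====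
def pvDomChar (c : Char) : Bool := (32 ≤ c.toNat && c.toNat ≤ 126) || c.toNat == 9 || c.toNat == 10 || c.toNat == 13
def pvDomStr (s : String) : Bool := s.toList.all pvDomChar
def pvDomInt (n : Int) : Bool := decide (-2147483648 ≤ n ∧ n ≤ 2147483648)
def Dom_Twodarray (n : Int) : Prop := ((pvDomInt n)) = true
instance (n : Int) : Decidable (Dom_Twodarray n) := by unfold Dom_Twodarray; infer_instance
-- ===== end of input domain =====

-- B replaces the 2D additive DP by per-row prefix sums of binomial coefficients
-- generated with the multiplicative recurrence: 'alternative'.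

-- ===== PORT A =====
-- literal transliteration of A; the loop bodies are named helpers. All reads and
-- writes use indices that are provably in range, so pyGetD/pySetD are exact
-- where Python indexes (Python would raise only out of range, which never happens).

-- body of 'for i in range(n): table[0][i] = 1; table[i][0] = 1'
def TwodarrayInitBody (t : List (List Int)) (i : Int) : List (List Int) :=
  let t := PySem.List.pySetD t 0 (PySem.List.pySetD (PySem.List.pyGetD t 0 []) i 1)
  PySem.List.pySetD t i (PySem.List.pySetD (PySem.List.pyGetD t i []) 0 1)

-- body of 'table[row][col] = table[row-1][col-1] + table[row-1][col]'
def TwodarrayDPBody (t : List (List Int)) (row col : Int) : List (List Int) :=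
  PySem.List.pySetD t row
    (PySem.List.pySetD (PySem.List.pyGetD t row []) col
      (PySem.List.pyGetD (PySem.List.pyGetD t (row - 1) []) (col - 1) 0 +
       PySem.List.pyGetD (PySem.List.pyGetD t (row - 1) []) col 0))

def Twodarray (n : Int) : List (List Int) :=
  -- table = [[0] * n for i in range(n)]
  let table : List (List Int) :=
    (PySem.List.pyRange 0 n 1).map (fun _ => PySem.List.pyRepeat [(0 : Int)] n)
  let table := (PySem.List.pyRange 0 n 1).foldl TwodarrayInitBody table
  (PySem.List.pyRange 1 n 1).foldl (fun t row =>
    (PySem.List.pyRange 1 n 1).foldl (fun t col => TwodarrayDPBody t row col) t) table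

-- ===== PORT B =====
-- transliteration of Source B; state (row, b, s): s += b; row.append(s); b = b*(r-c)//(c+1)
def TwodarrayAltStep (r : Int) (st : List Int × Int × Int) (c : Int) : List Int × Int × Int :=
  let s := st.2.2 + st.2.1
  (st.1 ++ [s], PySem.Int.floordiv (st.2.1 * (r - c)) (c + 1), s)

def Twodarray_alt (n : Int) : List (List Int) :=
  (PySem.List.pyRange 0 n 1).foldl (fun out r =>
    out ++ [((PySem.List.pyRange 0 n 1).foldl (TwodarrayAltStep r) ([], 1, 0)).1]) []

-- ===== PRECONDITION & SPEC =====
def Spec_Twodarray (n : Int) (out : List (List Int)) : Prop := out = Twodarray_alt n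
instance (n : Int) (out : List (List Int)) : Decidable (Spec_Twodarray n out) := by unfold Spec_Twodarray; infer_instance

-- ===== CLAIM (what is proved, stated in full; the proofs are below) =====
def Claim_equal_Twodarray : Prop := ∀ (n : Int), Dom_Twodarray n → Spec_Twodarray n (Twodarray n)

-- ===== LEMMAS AND PROOFS =====

-- prefix sums of Pascal's row r: the common value of table[r][c]
def pvSv (r c : Nat) : Int := ∑ k ∈ Finset.range (c + 1), (r.choose k : Int)

-- partial sum (B's accumulator s before step c)
def pvT (r j : Nat) : Int := ∑ k ∈ Finset.range j, (r.choose k : Int)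

-- a function-backed N×N table
def pvTbl (N : Nat) (f : Nat → Nat → Int) : List (List Int) :=
  (List.range N).map (fun r => (List.range N).map (f r))

-- intermediate states of A's loops
def pvGI (m r c : Nat) : Int := if (r = 0 ∧ c < m) ∨ (c = 0 ∧ r < m) then 1 else 0
def pvFR (R r c : Nat) : Int := if r = 0 ∨ c = 0 then 1 else if r < R then pvSv r c else 0
def pvGC (R C r c : Nat) : Int :=
  if r = R then (if c = 0 then 1 else if c < C then pvSv R c else 0) else pvFR R r c

lemma pvSv_zero_left (c : Nat) : pvSv 0 c = 1 := by
  unfold pvSv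
  induction c with
  | zero => simp
  | succ c ih => rw [Finset.sum_range_succ]; simp at ih ⊢; omega

lemma pvSv_zero_right (r : Nat) : pvSv r 0 = 1 := by simp [pvSv]

lemma pvSv_step (r c : Nat) : pvSv r (c + 1) = pvSv r c + (r.choose (c + 1) : Int) := by
  rw [pvSv, Finset.sum_range_succ]; rfl

lemma pvSv_pascal (r c : Nat) : pvSv (r + 1) (c + 1) = pvSv r c + pvSv r (c + 1) := by
  induction c with
  | zero =>
    rw [pvSv_step, pvSv_step, pvSv_zero_right, pvSv_zero_right]
    push_cast [Nat.choose_one_right]; ring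
  | succ c ih =>
    rw [pvSv_step (r+1) (c+1), ih, pvSv_step r (c+1), pvSv_step r c]
    push_cast [Nat.choose_succ_succ r (c+1)]; ring

lemma pvFR_lt (R r c : Nat) (h : r < R) : pvFR R r c = pvSv r c := by
  by_cases h1 : r = 0 ∨ c = 0
  · rw [pvFR, if_pos h1]
    rcases h1 with rfl | rfl
    · exact (pvSv_zero_left c).symm
    · exact (pvSv_zero_right r).symm
  · rw [pvFR, if_neg h1, if_pos h]

-- generic invariant rule for a fold over List.range
lemma pvFoldlRangeInv {α : Type} (body : α → Nat → α) (g : Nat → α) (N : Nat)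
    (h : ∀ m, m < N → body (g m) m = g (m + 1)) :
    (List.range N).foldl body (g 0) = g N := by
  induction N with
  | zero => simp
  | succ N ih =>
    rw [List.range_succ, List.foldl_append, ih (fun m hm => h m (by omega))]
    simpa using h N (by omega)

-- set on a range-map is a pointwise update (out of range: a no-op on both sides)
lemma pvSetMapRange {α : Type} (N c : Nat) (f : Nat → α) (v : α) :
    ((List.range N).map f).set c v = (List.range N).map (fun j => if j = c then v else f j) := by
  apply List.ext_getElem <;> simp
  intro i hi
  by_cases h : i = c <;> simp [h, List.getElem_set]
  exact fun hc => absurd hc.symm h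

lemma pvSetD_zero {α : Type} (xs : List α) (v : α) : PySem.List.pySetD xs 0 v = xs.set 0 v := by
  simpa using PySem.List.pySetD_natCast xs 0 v

lemma pvTblCongr (N : Nat) (f g : Nat → Nat → Int)
    (h : ∀ r < N, ∀ c < N, f r c = g r c) : pvTbl N f = pvTbl N g := by
  unfold pvTbl
  apply List.map_congr_left
  intro r hr
  apply List.map_congr_left
  intro c hc
  exact h r (List.mem_range.mp hr) c (List.mem_range.mp hc)

-- ---- A side ----

lemma pvInitStep (N m : Nat) (hm : m < N) :
    TwodarrayInitBody (pvTbl N (pvGI m)) (m : Int) = pvTbl N (pvGI (m + 1)) := by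
  have h0 : 0 < N := by omega
  unfold TwodarrayInitBody pvTbl
  simp only [PySem.List.pyGetD_zero, PySem.List.pyGetD_natCast, PySem.List.pySetD_natCast,
    pvSetD_zero]
  rw [PySem.List.getD_map_range _ _ _ _ h0, pvSetMapRange, pvSetMapRange,
    PySem.List.getD_map_range _ _ _ _ hm, pvSetMapRange]
  apply List.map_congr_left
  intro r hrmem
  have hr := List.mem_range.mp hrmem
  by_cases hrm : r = m
  · subst hrm
    rw [if_pos rfl]
    by_cases hm0 : r = 0
    · rw [if_pos hm0, pvSetMapRange]
      apply List.map_congr_left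
      intro c hcmem
      have hc := List.mem_range.mp hcmem
      simp only [pvGI]
      split_ifs <;> first | rfl | omega | (simp only [true_and] at *; omega)
    · rw [if_neg hm0, pvSetMapRange]
      apply List.map_congr_left
      intro c hcmem
      have hc := List.mem_range.mp hcmem
      simp only [pvGI]
      split_ifs <;> first | rfl | omega | (simp only [true_and] at *; omega)
  · rw [if_neg hrm]
    by_cases hr0 : r = 0
    · rw [if_pos hr0]
      subst hr0
      apply List.map_congr_left
      intro c hcmem
      have hc := List.mem_range.mp hcmem
      simp only [pvGI]
      split_ifs <;> first | rfl | omega | (simp only [true_and] at *; omega)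
    · rw [if_neg hr0]
      apply List.map_congr_left
      intro c hcmem
      have hc := List.mem_range.mp hcmem
      simp only [pvGI]
      split_ifs <;> first | rfl | omega | (simp only [true_and] at *; omega)

lemma pvInnerStep (N R j : Nat) (hR : 0 < R) (hRN : R < N) (hj : j + 1 < N) :
    TwodarrayDPBody (pvTbl N (pvGC R (j + 1))) (R : Int) ((j + 1 : Nat) : Int)
      = pvTbl N (pvGC R (j + 2)) := by
  have hR1 : R - 1 < N := by omega
  have hjN : j < N := by omega
  have e1 : (R : Int) - 1 = ((R - 1 : Nat) : Int) := by omega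
  have e2 : ((j + 1 : Nat) : Int) - 1 = ((j : Nat) : Int) := by push_cast; ring
  unfold TwodarrayDPBody pvTbl
  rw [e1, e2]
  simp only [PySem.List.pyGetD_natCast, PySem.List.pySetD_natCast]
  rw [PySem.List.getD_map_range _ _ _ _ hRN, PySem.List.getD_map_range _ _ _ _ hR1,
    PySem.List.getD_map_range _ _ _ _ hjN, PySem.List.getD_map_range _ _ _ _ hj,
    pvSetMapRange, pvSetMapRange]
  have hval : pvGC R (j + 1) (R - 1) j + pvGC R (j + 1) (R - 1) (j + 1) = pvSv R (j + 1) := by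
    have hne : R - 1 ≠ R := by omega
    rw [pvGC, if_neg hne, pvGC, if_neg hne, pvFR_lt _ _ _ (by omega), pvFR_lt _ _ _ (by omega)]
    have := pvSv_pascal (R - 1) j
    rw [Nat.sub_add_cancel hR] at this
    exact this.symm
  rw [hval]
  apply List.map_congr_left
  intro r hrmem
  have hr := List.mem_range.mp hrmem
  by_cases hrR : r = R
  · subst hrR
    rw [if_pos rfl]
    apply List.map_congr_left
    intro c hcmem
    have hc := List.mem_range.mp hcmem
    simp only [pvGC, pvFR]
    split_ifs <;> first | rfl | omega | (congr 1; omega) | (simp only [true_and] at *; omega)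
  · rw [if_neg hrR]
    apply List.map_congr_left
    intro c hcmem
    have hc := List.mem_range.mp hcmem
    simp only [pvGC, pvFR, if_neg hrR]

lemma pvRow (N R M : Nat) (hR : 0 < R) (hRN : R < N) (hM : M + 1 = N) :
    (List.range M).foldl (fun t j => TwodarrayDPBody t (R : Int) ((j + 1 : Nat) : Int))
        (pvTbl N (pvFR R))
      = pvTbl N (pvFR (R + 1)) := by
  have h0 : pvTbl N (pvFR R) = pvTbl N (pvGC R 1) := by
    apply pvTblCongr
    intro r hr c hc
    by_cases hrR : r = R <;> simp [pvFR, pvGC, hrR] <;> omega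
  rw [h0,
    pvFoldlRangeInv _ (fun j => pvTbl N (pvGC R (j + 1))) M
      (fun j hj => by
        have := pvInnerStep N R j hR hRN (by omega)
        simpa using this)]
  apply pvTblCongr
  intro r hr c hc
  by_cases hrR : r = R
  · subst hrR
    rcases Nat.eq_zero_or_pos c with rfl | hc0
    · simp [pvGC, pvFR]
    · have : c < M + 1 := by omega
      simp [pvGC, pvFR, hc0.ne', this, hR.ne']
  · simp only [pvGC, pvFR, if_neg hrR]
    split_ifs <;> first | rfl | (exfalso; omega)

theorem pvA_eq (n : Int) : Twodarray n = pvTbl n.toNat pvSv := by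
  unfold Twodarray
  by_cases hn : n ≤ 0
  · rw [PySem.List.pyRange_one_eq_nil (show n ≤ 0 from hn),
      PySem.List.pyRange_one_eq_nil (show n ≤ 1 by omega)]
    have h0 : n.toNat = 0 := by omega
    simp [h0, pvTbl]
  · -- here 1 ≤ n
    have hN1 : 1 ≤ n.toNat := by omega
    have hM : (n - 1).toNat + 1 = n.toNat := by omega
    rw [PySem.List.pyRange_one 0 n, PySem.List.pyRange_one 1 n]
    have hcast : ∀ (k : Nat), (1 : Int) + (k : Int) = ((k + 1 : Nat) : Int) := by
      intro k; push_cast; ring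
    simp only [Int.sub_zero, zero_add, List.foldl_map, List.map_map, hcast]
    have htbl0 : (List.range n.toNat).map
        ((fun _ => PySem.List.pyRepeat [(0 : Int)] n) ∘ fun (k : Nat) => ((k : Int)))
        = pvTbl n.toNat (fun _ _ => 0) := by
      unfold pvTbl
      apply List.map_congr_left
      intro r _
      show PySem.List.pyRepeat [(0 : Int)] n = (List.range n.toNat).map (fun _ => 0)
      rw [PySem.List.pyRepeat_singleton]
      apply List.ext_getElem <;> simp
    rw [htbl0]
    have hInitEq : (List.range n.toNat).foldl (fun t (k : Nat) => TwodarrayInitBody t (k : Int))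
        (pvTbl n.toNat (fun _ _ => 0)) = pvTbl n.toNat (pvGI n.toNat) := by
      rw [show pvTbl n.toNat (fun _ _ => (0 : Int)) = pvTbl n.toNat (pvGI 0) from
        pvTblCongr _ _ _ (fun r _ c _ => by simp [pvGI])]
      exact pvFoldlRangeInv _ (fun m => pvTbl n.toNat (pvGI m)) n.toNat
        (fun m hm => pvInitStep n.toNat m hm)
    rw [hInitEq]
    have hStart : pvTbl n.toNat (pvGI n.toNat) = pvTbl n.toNat (pvFR 1) := by
      apply pvTblCongr
      intro r hr c hc
      simp only [pvGI, pvFR]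
      split_ifs <;> first | rfl | omega | (simp only [true_and] at *; omega)
    rw [hStart]
    have hOuter := pvFoldlRangeInv
      (fun t (k : Nat) => (List.range (n - 1).toNat).foldl
        (fun t (j : Nat) => TwodarrayDPBody t ((k + 1 : Nat) : Int) ((j + 1 : Nat) : Int)) t)
      (fun k => pvTbl n.toNat (pvFR (k + 1))) (n - 1).toNat
      (fun k hk => pvRow n.toNat (k + 1) (n - 1).toNat (Nat.succ_pos k) (by omega) hM)
    simp only [Nat.zero_add] at hOuter
    rw [hOuter, hM]
    exact pvTblCongr _ _ _ (fun r hr c hc => pvFR_lt n.toNat r c hr)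

-- ---- B side ----

lemma pvChooseStep (r j : Nat) :
    PySem.Int.floordiv ((r.choose j : Int) * ((r : Int) - (j : Int))) ((j : Int) + 1)
      = (r.choose (j + 1) : Int) := by
  rcases Nat.lt_or_ge j r with h | h
  · have hsub : (r : Int) - (j : Int) = ((r - j : Nat) : Int) := by
      push_cast [Nat.cast_sub h.le]; ring
    have h1 : ((r.choose j : Int)) * ((r : Int) - (j : Int)) = ((r.choose j * (r - j) : Nat) : Int) := by
      rw [hsub]; push_cast; ring
    have h2 : ((j : Int) + 1) = ((j + 1 : Nat) : Int) := by push_cast; ring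
    rw [h1, h2, PySem.Int.floordiv_natCast, ← Nat.choose_succ_right_eq,
      Nat.mul_div_cancel _ (Nat.succ_pos j)]
  · have h0 : (r.choose j : Int) * ((r : Int) - (j : Int)) = 0 := by
      rcases eq_or_lt_of_le h with rfl | h'
      · simp
      · simp [Nat.choose_eq_zero_of_lt h']
    rw [h0, Nat.choose_eq_zero_of_lt (by omega)]
    rw [PySem.Int.floordiv_eq_ediv_of_pos (by omega)]
    simp

lemma pvAltRow (r N : Nat) :
    (List.range N).foldl (fun st j => TwodarrayAltStep (r : Int) st ((j : Nat) : Int)) ([], 1, 0)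
      = ((List.range N).map (fun c => pvSv r c), (r.choose N : Int), pvT r N) := by
  have h := pvFoldlRangeInv (fun st j => TwodarrayAltStep (r : Int) st ((j : Nat) : Int))
    (fun m => ((List.range m).map (fun c => pvSv r c), (r.choose m : Int), pvT r m)) N
    (fun m hm => by
      unfold TwodarrayAltStep
      dsimp only
      have hsum : pvT r m + (r.choose m : Int) = pvSv r m := by
        rw [pvSv, pvT, Finset.sum_range_succ]
      refine congrArg₂ Prod.mk ?_ (congrArg₂ Prod.mk ?_ ?_)
      · rw [hsum, List.range_succ, List.map_append]; rfl
      · exact pvChooseStep r m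
      · rw [hsum, pvSv, pvT]
  )
  simpa [pvT] using h

theorem pvB_eq (n : Int) : Twodarray_alt n = pvTbl n.toNat pvSv := by
  unfold Twodarray_alt
  rw [PySem.List.pyRange_one 0 n]
  simp only [Int.sub_zero, zero_add, List.foldl_map]
  have h := pvFoldlRangeInv
    (fun (out : List (List Int)) (k : Nat) =>
      out ++ [((List.range n.toNat).foldl
        (fun st j => TwodarrayAltStep (k : Int) st ((j : Nat) : Int)) ([], 1, 0)).1])
    (fun m => (List.range m).map (fun r => (List.range n.toNat).map (fun c => pvSv r c)))
    n.toNat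
    (fun m hm => by
      dsimp only
      rw [pvAltRow m n.toNat, List.range_succ, List.map_append]
      rfl)
  simpa [pvTbl] using h

-- ===== VERDICT (by name: the statement is the Claim_ definition above) =====
theorem Twodarray_spec : Claim_equal_Twodarray := by
  intro n _
  unfold Spec_Twodarray
  rw [pvA_eq, pvB_eq]
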